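-- pv_equiv track=rewrite | github.com/Nikhilsavadi/asrs-bot | strategy_vwap.py | count_vwap_crosses
-- ===== SOURCE A (Python) =====
-- def count_vwap_crosses(above_series: list[bool]) -> int:
--     """Count VWAP crosses in a series of above/below flags."""
--     if len(above_series) < 2:
--         return 0
--     crosses = 0
--     for i in range(1, len(above_series)):
--         if above_series[i] != above_series[i - 1]:
--             crosses += 1
--     return crosses
-- ===== SOURCE B (Python) =====
-- def count_vwap_crosses(above_series: list[bool]) -> int:
--     """Count VWAP crosses in a series of above/below flags.
--
--     Divide and conquer: split the series at the midpoint, count crosses in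
--     each half recursively, and add one if the flags change across the split.
--     """
--     n = len(above_series)
--     if n < 2:
--         return 0
--     if n == 2:
--         return int(above_series[0] != above_series[1])
--     m = n // 2
--     return (count_vwap_crosses(above_series[:m])
--             + count_vwap_crosses(above_series[m:])
--             + int(above_series[m - 1] != above_series[m]))
-- ===== Notes on version B (the rewrite author's own statement) =====
-- stated objective: alternative
-- what changed: Replaces A's single left-to-right pairwise-comparison loop with a divide-and-conquer recursion: split the series at the midpoint, count crosses in each half recursively, and add one boundary cross if the flags differ across the split.
import Mathlib
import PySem

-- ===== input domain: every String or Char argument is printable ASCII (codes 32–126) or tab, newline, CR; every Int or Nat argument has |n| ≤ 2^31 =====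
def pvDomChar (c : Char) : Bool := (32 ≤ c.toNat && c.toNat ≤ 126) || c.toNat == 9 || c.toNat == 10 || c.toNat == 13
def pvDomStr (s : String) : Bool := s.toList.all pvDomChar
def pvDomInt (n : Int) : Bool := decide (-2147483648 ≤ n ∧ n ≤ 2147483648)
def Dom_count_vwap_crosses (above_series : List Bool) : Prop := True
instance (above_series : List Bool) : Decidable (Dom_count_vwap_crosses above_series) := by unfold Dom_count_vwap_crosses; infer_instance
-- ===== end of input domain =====

-- B counts crosses by divide and conquer (split at the midpoint, recurse on the halves,
-- add the boundary cross) instead of A's single pairwise left-to-right loop; not faster, alternative.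

-- ===== PORT A =====
def count_vwap_crosses (above_series : List Bool) : Int :=
  if above_series.length < 2 then 0
  else
    (PySem.List.pyRange 1 (above_series.length : Int) 1).foldl
      (fun crosses i =>
        if PySem.List.pyGetD above_series i false ≠ PySem.List.pyGetD above_series (i - 1) false
        then crosses + 1 else crosses) 0

-- ===== PORT B =====
-- xs[:m] / xs[m:] with 0 ≤ m ≤ len are take m / drop m (PySem.List.slice_to_natCast /
-- slice_from_natCast); n // 2 for n : Nat is Nat division (PySem.Int.floordiv_natCast).
def count_vwap_crosses_alt (above_series : List Bool) : Int :=
  let n := above_series.length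
  if n < 2 then 0
  else if n = 2 then
    (if PySem.List.pyGetD above_series 0 false ≠ PySem.List.pyGetD above_series 1 false
     then 1 else 0)
  else
    let m := n / 2
    count_vwap_crosses_alt (above_series.take m) +
    count_vwap_crosses_alt (above_series.drop m) +
    (if PySem.List.pyGetD above_series ((m : Int) - 1) false ≠
        PySem.List.pyGetD above_series (m : Int) false
     then 1 else 0)
termination_by above_series.length
decreasing_by
  · simp; omega
  · simp; omega

-- ===== PRECONDITION & SPEC =====
def Spec_count_vwap_crosses (above_series : List Bool) (out : Int) : Prop := out = count_vwap_crosses_alt above_series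
instance (above_series : List Bool) (out : Int) : Decidable (Spec_count_vwap_crosses above_series out) := by unfold Spec_count_vwap_crosses; infer_instance

-- ===== CLAIM =====
def Claim_equal_count_vwap_crosses : Prop := ∀ (above_series : List Bool), Dom_count_vwap_crosses above_series → Spec_count_vwap_crosses above_series (count_vwap_crosses above_series)

-- ===== LEMMAS AND PROOFS =====

-- the pairwise cross count, the common reference both ports are reduced to
def pvCross : List Bool → Int
  | [] => 0
  | [_] => 0
  | a :: b :: t => (if a ≠ b then 1 else 0) + pvCross (b :: t)

-- A's loop, as its own name
def pvAFold (xs : List Bool) : Int :=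
  (PySem.List.pyRange 1 (xs.length : Int) 1).foldl
    (fun crosses i =>
      if PySem.List.pyGetD xs i false ≠ PySem.List.pyGetD xs (i - 1) false
      then crosses + 1 else crosses) 0

theorem pyGetD_append_left (xs ys : List Bool) (i : Int) (d : Bool)
    (h0 : 0 ≤ i) (h : i < (xs.length : Int)) :
    PySem.List.pyGetD (xs ++ ys) i d = PySem.List.pyGetD xs i d := by
  have hi : i.toNat < xs.length := by omega
  rw [PySem.List.pyGetD_eq_getElem (xs ++ ys) d h0 (by simp; omega),
      PySem.List.pyGetD_eq_getElem xs d h0 (by omega)]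
  exact List.getElem_append_left hi

theorem pyGetD_append_last (xs : List Bool) (y : Bool) (d : Bool) :
    PySem.List.pyGetD (xs ++ [y]) (xs.length : Int) d = y := by
  rw [PySem.List.pyGetD_eq_getElem (xs ++ [y]) d (by omega) (by simp)]
  simp

theorem pyGetD_last (xs : List Bool) (d : Bool) (h : xs ≠ []) :
    PySem.List.pyGetD xs ((xs.length : Int) - 1) d = xs.getLastD d := by
  have hl : 0 < xs.length := List.length_pos_iff.mpr h
  rw [PySem.List.pyGetD_eq_getElem xs d (by omega) (by omega)]
  rw [List.getLastD_eq_getLast?, List.getLast?_eq_getElem?,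
      List.getElem?_eq_getElem (by omega : xs.length - 1 < xs.length)]
  simp only [Option.getD_some]
  exact getElem_congr_idx (by omega)

-- pvCross splits at a concatenation boundary
theorem pvCross_append (l r : List Bool) (hl : l ≠ []) (hr : r ≠ []) :
    pvCross (l ++ r) =
      pvCross l + pvCross r + (if l.getLastD false ≠ r.headD false then 1 else 0) := by
  induction l with
  | nil => exact absurd rfl hl
  | cons a t ih =>
    cases t with
    | nil =>
      cases r with
      | nil => exact absurd rfl hr
      | cons b u =>
        rcases eq_or_ne a b with hc | hc
        · simp [pvCross, hc]
        · simp [pvCross, hc]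
          omega
    | cons b t' =>
      have hih := ih (by simp)
      simp only [List.cons_append] at *
      rw [show pvCross (a :: b :: (t' ++ r)) = (if a ≠ b then 1 else 0) + pvCross (b :: (t' ++ r)) from rfl,
          hih, show pvCross (a :: b :: t') = (if a ≠ b then 1 else 0) + pvCross (b :: t') from rfl]
      simp
      omega

-- A's fold grows by the adjacent comparison when a last element is appended
theorem pvAFold_snoc (xs : List Bool) (y : Bool) (h : xs ≠ []) :
    pvAFold (xs ++ [y]) =
      pvAFold xs + (if xs.getLastD false ≠ y then 1 else 0) := by
  have hl : 0 < xs.length := List.length_pos_iff.mpr h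
  unfold pvAFold
  have hlen : ((xs ++ [y]).length : Int) = (xs.length : Int) + 1 := by simp
  rw [hlen, PySem.List.pyRange_one_succ_right (by omega), List.foldl_append]
  rw [PySem.List.foldl_congr_mem _
        (fun crosses i =>
          if PySem.List.pyGetD (xs ++ [y]) i false ≠ PySem.List.pyGetD (xs ++ [y]) (i - 1) false
          then crosses + 1 else crosses)
        (fun crosses i =>
          if PySem.List.pyGetD xs i false ≠ PySem.List.pyGetD xs (i - 1) false
          then crosses + 1 else crosses) 0
        (by
          intro acc i hi
          have hmem := (PySem.List.mem_pyRange_one).1 hi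
          simp only [pyGetD_append_left xs [y] i false (by omega) (by omega),
              pyGetD_append_left xs [y] (i - 1) false (by omega) (by omega)])]
  simp only [List.foldl_cons, List.foldl_nil]
  rw [pyGetD_append_last,
      pyGetD_append_left xs [y] ((xs.length : Int) - 1) false (by omega) (by omega),
      pyGetD_last xs false h]
  rw [List.getLastD_eq_getLast?]
  rcases eq_or_ne (xs.getLast?.getD false) y with hc | hc
  · simp [hc]
  · simp [hc, Ne.symm hc]

theorem pvCross_snoc (xs : List Bool) (y : Bool) (h : xs ≠ []) :
    pvCross (xs ++ [y]) = pvCross xs + (if xs.getLastD false ≠ y then 1 else 0) := by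
  have := pvCross_append xs [y] h (by simp)
  simpa [pvCross] using this

theorem pvAFold_eq (xs : List Bool) : pvAFold xs = pvCross xs := by
  induction xs using List.reverseRecOn with
  | nil => simp [pvAFold, pvCross, PySem.List.pyRange]
  | append_singleton t y ih =>
    cases t with
    | nil => simp [pvAFold, pvCross, PySem.List.pyRange]
    | cons a t' =>
      rw [pvAFold_snoc _ y (by simp), pvCross_snoc _ y (by simp), ih]

theorem pyGetD_getD (xs : List Bool) (i : Nat) (hi : i < xs.length) :
    PySem.List.pyGetD xs (i : Int) false = xs[i] := by
  rw [PySem.List.pyGetD_eq_getElem xs false (by omega) (by omega)]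
  exact getElem_congr_idx (by omega)

theorem alt_eq_pvCross (xs : List Bool) : count_vwap_crosses_alt xs = pvCross xs := by
  generalize hn : xs.length = N
  induction N using Nat.strong_induction_on generalizing xs with
  | _ N ih =>
    rw [count_vwap_crosses_alt]
    by_cases h1 : xs.length < 2
    · match xs, h1 with
      | [], _ => simp [pvCross]
      | [a], _ => simp [pvCross]
    · by_cases h2 : xs.length = 2
      · simp only [h2, if_true]
        match xs, h2 with
        | [a, b], _ =>
          rcases eq_or_ne a b with hc | hc <;>
            simp [pvCross, PySem.List.pyGetD, hc]
      · simp only [h1, if_false, h2, if_false]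
        set m := xs.length / 2 with hm
        have hn3 : 3 ≤ xs.length := by omega
        have hm1 : 1 ≤ m := by omega
        have hmn : m < xs.length := by omega
        have htd : xs.take m ++ xs.drop m = xs := List.take_append_drop m xs
        have hsplit := pvCross_append (xs.take m) (xs.drop m)
          (List.ne_nil_of_length_pos (by rw [List.length_take]; omega))
          (List.ne_nil_of_length_pos (by rw [List.length_drop]; omega))
        rw [htd] at hsplit
        rw [hsplit,
            ih (xs.take m).length (by rw [List.length_take]; omega) _ rfl,
            ih (xs.drop m).length (by rw [List.length_drop]; omega) _ rfl]
        congr 1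
        -- boundary comparison: xs[m-1] vs xs[m]
        have hlast : (xs.take m).getLastD false = xs[m - 1]'(by omega) := by
          rw [List.getLastD_eq_getLast?, List.getLast?_eq_getElem?]
          rw [List.getElem?_eq_getElem (by simp; omega : (xs.take m).length - 1 < (xs.take m).length)]
          simp only [Option.getD_some]
          rw [List.getElem_take]
          exact getElem_congr_idx (by simp; omega)
        have hhead : (xs.drop m).headD false = xs[m]'hmn := by
          rw [List.headD_eq_head?, List.head?_eq_getElem?]
          rw [List.getElem?_eq_getElem (by simp; omega : 0 < (xs.drop m).length)]
          simp only [Option.getD_some]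
          rw [List.getElem_drop]
          exact getElem_congr_idx (by omega)
        have hgm1 : PySem.List.pyGetD xs ((m : Int) - 1) false = xs[m - 1]'(by omega) := by
          have he : ((m : Int) - 1) = ((m - 1 : Nat) : Int) := by omega
          rw [he, pyGetD_getD xs (m - 1) (by omega)]
        have hgm : PySem.List.pyGetD xs (m : Int) false = xs[m]'hmn := by
          rw [pyGetD_getD xs m hmn]
        rw [hgm1, hgm, hlast, hhead]

-- ===== VERDICT =====
theorem count_vwap_crosses_spec : Claim_equal_count_vwap_crosses := by
  intro xs _
  unfold Spec_count_vwap_crosses count_vwap_crosses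
  rw [alt_eq_pvCross]
  by_cases h : xs.length < 2
  · match xs, h with
    | [], _ => simp [pvCross]
    | [a], _ => simp [pvCross]
  · simp only [h, if_false]
    exact pvAFold_eq xs
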